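-- pv_equiv track=rewrite | github.com/hunseok329/programmers | [1차] 프렌즈4블록.py | solution
-- ===== SOURCE A (Python) =====
-- def find(board):
--     data = []
--     for y in range(len(board)-1):
--         length = min(len(board[y]), len(board[y+1]))
--         for x in range(length-1):
--             if board[y][x] == board[y][x+1] == board[y+1][x] == board[y+1][x+1]:
--                 data.append((y, x))
--                 data.append((y, x+1))
--                 data.append((y+1, x))
--                 data.append((y+1, x+1))
--     return data
--
-- def solution(m, n, board):
--     board = list(map(lambda x: list(x), board))
--     board = list(map(list, zip(*board[::-1])))
--     count = 0
--     while True: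
--         data = find(board)
--         data = sorted(list(set(data)), reverse=True)
--         count += len(data)
--         if data:
--             for y, x in data:
--                 del board[y][x]
--         else:
--             return count
-- ===== SOURCE B (Python) =====
-- def solution(m, n, board):
--     # Fixed-size grid in the board's original orientation (rows top-to-bottom),
--     # with None as a permanent "empty" sentinel; no rotation, no list shrinking.
--     h = len(board)
--     w = min((len(row) for row in board), default=0)
--     grid = [[board[r][c] for c in range(w)] for r in range(h)]
--     total = 0
--     while True:
--         marked = set()
--         for r in range(h - 1):
--             for c in range(w - 1):
--                 if grid[r][c] is not None and \
--                         grid[r][c] == grid[r][c + 1] == grid[r + 1][c] == grid[r + 1][c + 1]: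
--                     marked.update(((r, c), (r, c + 1), (r + 1, c), (r + 1, c + 1)))
--         if not marked:
--             return total
--         total += len(marked)
--         # gravity per column: surviving tiles fall to the bottom, None pads the top
--         stacks = [[grid[r][c] for r in range(h)
--                    if grid[r][c] is not None and (r, c) not in marked]
--                   for c in range(w)]
--         padded = [[None] * (h - len(s)) + s for s in stacks]
--         grid = [[padded[c][r] for c in range(w)] for r in range(h)]
-- ===== Notes on version B (the rewrite author's own statement) =====
-- stated objective: alternative
-- what changed: B never rotates the board and never shrinks a list: it keeps a fixed-size grid in the original row/column orientation with a None sentinel for empty cells, collects each round's 2x2 match cells into a set during one scan, and applies gravity by rebuilding every column from its survivor stack padded with None on top, instead of A's zip-rotation plus per-round dedup + reverse-sort and in-place del of cells.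
import Mathlib
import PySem

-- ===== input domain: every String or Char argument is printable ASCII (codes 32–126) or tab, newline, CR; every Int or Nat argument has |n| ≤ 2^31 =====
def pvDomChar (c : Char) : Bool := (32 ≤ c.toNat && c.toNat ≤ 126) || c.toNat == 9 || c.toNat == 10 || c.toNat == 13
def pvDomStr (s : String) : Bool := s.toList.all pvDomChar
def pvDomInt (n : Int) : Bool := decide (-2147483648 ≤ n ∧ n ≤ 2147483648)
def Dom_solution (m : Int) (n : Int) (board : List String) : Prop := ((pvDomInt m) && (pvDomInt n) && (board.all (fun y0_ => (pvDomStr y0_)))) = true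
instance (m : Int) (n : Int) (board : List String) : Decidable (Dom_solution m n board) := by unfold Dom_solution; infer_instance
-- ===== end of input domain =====

-- B replaces A's rotated, shrinking board with a FIXED-SIZE grid in the original orientation:
-- an Option-Char sentinel marks empty cells, each round scans for 2x2 matches into a set and
-- gravity rebuilds every column from its survivor stack (no rotation, no sort, no in-place del);
-- equivalence of the RETURN value is proved (neither version observably mutates its argument).

-- total number of cells of A's grid; used only to compute the fuel (a totality bound for the
-- while-True loops: each productive round strictly shrinks the grid, so it is never exhausted)
def cellCount (g : List (List Char)) : Nat := (g.map List.length).sum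

-- ===== PORT A =====
-- zip(*rows) on a list of char-lists, ported by hand (exact: truncates to the shortest row;
-- every index below is in range, so getD's default ' ' is never used)
def pyZipStar (rows : List (List Char)) : List (List Char) :=
  (List.range ((rows.map List.length).min?.getD 0)).map
    (fun i => rows.map (fun r => r.getD i ' '))

-- find(board): loop indices are nonnegative ints, ported as Nat ranges (exact here)
def findA (board : List (List Char)) : List (Nat × Nat) :=
  (List.range (board.length - 1)).foldl (fun data y =>
    let length := min (board.getD y []).length (board.getD (y+1) []).length
    (List.range (length - 1)).foldl (fun data x =>
      if (board.getD y []).getD x ' ' = (board.getD y []).getD (x+1) ' '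
         ∧ (board.getD y []).getD (x+1) ' ' = (board.getD (y+1) []).getD x ' '
         ∧ (board.getD (y+1) []).getD x ' ' = (board.getD (y+1) []).getD (x+1) ' '
      then data ++ [(y, x), (y, x+1), (y+1, x), (y+1, x+1)]
      else data) data) []

-- the while-True loop; 'del board[y][x]' = modify row y by eraseIdx x (indices always valid)
def loopA : Nat → List (List Char) → Int → Int
  | 0, _, count => count
  | fuel+1, board, count =>
    let data := PySem.List.sorted2 (PySem.Set.ofList (findA board)) Prod.fst Prod.snd true
    let count := count + (data.length : Int)
    if data ≠ [] then
      loopA fuel (data.foldl (fun b p => b.modify p.1 (fun row => row.eraseIdx p.2)) board) count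
    else count

def solution (m : Int) (n : Int) (board : List String) : Int :=
  let b1 := board.map (fun x => x.toList)
  let b2 := pyZipStar b1.reverse
  loopA (cellCount b2 + 1) b2 0

-- ===== PORT B =====
-- one scan of the fixed grid, collecting every cell of a 2x2 match into a set
def scanB (h w : Nat) (grid : List (List (Option Char))) : PySem.Set (Nat × Nat) :=
  (List.range (h - 1)).foldl (fun (marked : PySem.Set (Nat × Nat)) (r : Nat) =>
    (List.range (w - 1)).foldl (fun (marked : PySem.Set (Nat × Nat)) (c : Nat) =>
      if (grid.getD r []).getD c none ≠ none
         ∧ (grid.getD r []).getD c none = (grid.getD r []).getD (c+1) none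
         ∧ (grid.getD r []).getD (c+1) none = (grid.getD (r+1) []).getD c none
         ∧ (grid.getD (r+1) []).getD c none = (grid.getD (r+1) []).getD (c+1) none
      then PySem.Set.update marked [(r, c), (r, c+1), (r+1, c), (r+1, c+1)]
      else marked) marked) (PySem.Set.empty : PySem.Set (Nat × Nat))

-- the per-column survivor stacks (the 'stacks' local of B)
def stacksB (h w : Nat) (grid : List (List (Option Char))) (marked : PySem.Set (Nat × Nat)) :
    List (List (Option Char)) :=
  (List.range w).map (fun c =>
    ((List.range h).filter (fun r =>
        ((grid.getD r []).getD c none).isSome && !(PySem.Set.contains marked (r, c)))).map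
      (fun r => (grid.getD r []).getD c none))

-- the none-padded columns (the 'padded' local of B)
def paddedB (h w : Nat) (grid : List (List (Option Char))) (marked : PySem.Set (Nat × Nat)) :
    List (List (Option Char)) :=
  (stacksB h w grid marked).map (fun s => List.replicate (h - s.length) none ++ s)

-- gravity: rebuild the rows from the padded columns
def fallB (h w : Nat) (grid : List (List (Option Char))) (marked : PySem.Set (Nat × Nat)) :
    List (List (Option Char)) :=
  (List.range h).map (fun r =>
    (List.range w).map (fun c => ((paddedB h w grid marked).getD c []).getD r none))

def loopB : Nat → Nat → Nat → List (List (Option Char)) → Int → Int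
  | 0, _, _, _, total => total
  | fuel+1, h, w, grid, total =>
    let marked := scanB h w grid
    if marked = [] then total
    else loopB fuel h w (fallB h w grid marked) (total + (marked.length : Int))

def solution_alt (m : Int) (n : Int) (board : List String) : Int :=
  let h := board.length
  let w := (board.map (fun row => row.toList.length)).min?.getD 0
  let grid := (List.range h).map (fun r =>
    (List.range w).map (fun c => some ((board.getD r "").toList.getD c ' ')))
  loopB (h * w + 1) h w grid 0

-- ===== PRECONDITION & SPEC =====
def Spec_solution (m : Int) (n : Int) (board : List String) (out : Int) : Prop := out = solution_alt m n board
instance (m : Int) (n : Int) (board : List String) (out : Int) : Decidable (Spec_solution m n board out) := by unfold Spec_solution; infer_instance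

-- ===== CLAIM (what is proved, stated in full; the proofs are below) =====
def Claim_equal_solution : Prop := ∀ (m : Int) (n : Int) (board : List String), Dom_solution m n board → Spec_solution m n board (solution m n board)

-- ===== LEMMAS AND PROOFS =====

-- A's round step in filtered form: column y keeps the heights not in the removed set R
def stepA (g : List (List Char)) (R : PySem.Set (Nat × Nat)) : List (List Char) :=
  g.zipIdx.map (fun p =>
    (p.1.zipIdx.filter (fun q => !(PySem.Set.contains R (p.2, q.2)))).map (fun q => q.1))

-- B's view of A's grid: column col (bottom-up) becomes a top-down padded Option column
def padCol (h : Nat) (col : List Char) : List (Option Char) :=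
  List.replicate (h - col.length) none ++ col.reverse.map some

def toB (h : Nat) (g : List (List Char)) : List (List (Option Char)) :=
  (List.range h).map (fun r => g.map (fun col => (padCol h col).getD r none))

-- invariant of A's grid: w columns, each of height ≤ h
def InvG (h w : Nat) (g : List (List Char)) : Prop :=
  g.length = w ∧ ∀ col ∈ g, col.length ≤ h

-- scanB's matches as a plain list of appended quadruples (same double loop)
def findB (h w : Nat) (grid : List (List (Option Char))) : List (Nat × Nat) :=
  (List.range (h - 1)).foldl (fun (data : List (Nat × Nat)) (r : Nat) =>
    (List.range (w - 1)).foldl (fun (data : List (Nat × Nat)) (c : Nat) =>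
      if (grid.getD r []).getD c none ≠ none
         ∧ (grid.getD r []).getD c none = (grid.getD r []).getD (c+1) none
         ∧ (grid.getD r []).getD (c+1) none = (grid.getD (r+1) []).getD c none
         ∧ (grid.getD (r+1) []).getD c none = (grid.getD (r+1) []).getD (c+1) none
      then data ++ [(r, c), (r, c+1), (r+1, c), (r+1, c+1)]
      else data) data) []

-- ---------- generic list lemmas ----------

lemma min?_reverse (l : List Nat) : l.reverse.min? = l.min? := by
  rcases h : l.min? with _ | a
  · rw [List.min?_eq_none_iff] at h; simp [h]
  · rw [List.min?_eq_some_iff] at h ⊢; simpa using h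

lemma getD_mem_of_lt {α : Type} (l : List α) (i : Nat) (hi : i < l.length) (d : α) :
    l.getD i d ∈ l := by
  rw [List.getD_eq_getElem?_getD, List.getElem?_eq_getElem hi, Option.getD_some]
  exact List.getElem_mem hi

lemma getD_map_lt {α β : Type} (l : List α) (f : α → β) (i : Nat) (hi : i < l.length)
    (d : β) (d' : α) : (l.map f).getD i d = f (l.getD i d') := by
  simp [List.getD_eq_getElem?_getD, List.getElem?_map, List.getElem?_eq_getElem hi]

lemma getD_range_map {α : Type} (n : Nat) (f : Nat → α) (i : Nat) (hi : i < n) (d : α) :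
    ((List.range n).map f).getD i d = f i := by
  rw [getD_map_lt _ _ _ (by simpa using hi) _ 0]
  simp [List.getD_eq_getElem?_getD, List.getElem?_range hi]

lemma map_getD_range {α : Type} (g : List α) (d : α) :
    (List.range g.length).map (fun y => g.getD y d) = g := by
  apply List.ext_getElem
  · simp
  · intro i h1 h2
    simp only [List.getElem_map, List.getElem_range, List.getD_eq_getElem?_getD]
    rw [List.getElem?_eq_getElem (by simpa using h2)]
    rfl

lemma map_eq_range_map {α β : Type} (l : List α) (f : α → β) (d : α) :
    l.map f = (List.range l.length).map (fun i => f (l.getD i d)) := by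
  conv_lhs => rw [← map_getD_range l d]
  rw [List.map_map]
  rfl

lemma zipIdx_map_getD {α β : Type} (g : List α) (d : α) (F : Nat → α → β) :
    (List.range g.length).map (fun y => F y (g.getD y d)) = g.zipIdx.map (fun p => F p.2 p.1) := by
  apply List.ext_getElem
  · simp
  · intro i h1 h2
    have hi : i < g.length := by simpa using h1
    simp only [List.getElem_map, List.getElem_range, List.getD_eq_getElem?_getD,
      List.getElem_zipIdx, List.getElem?_eq_getElem hi]
    simp

-- a fold that mirrors a list-append fold through Set.ofList
lemma foldl_ofList_hom {ι α : Type} [BEq α] [LawfulBEq α] (l : List ι)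
    (fA : List α → ι → List α) (fB : PySem.Set α → ι → PySem.Set α)
    (h : ∀ d i, fB (PySem.Set.ofList d) i = PySem.Set.ofList (fA d i)) :
    ∀ d0, l.foldl fB (PySem.Set.ofList d0) = PySem.Set.ofList (l.foldl fA d0) := by
  induction l with
  | nil => intro d0; rfl
  | cons i t ih => intro d0; simp only [List.foldl_cons, h d0 i]; exact ih _

lemma rev_filter_map_range {α : Type} (nl : Nat) (Q : Nat → Bool) (f : Nat → α) :
    (((List.range nl).filter Q).map f).reverse
      = ((List.range nl).filter (fun j => Q (nl - 1 - j))).map (fun j => f (nl - 1 - j)) := by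
  rw [← List.map_reverse, ← List.filter_reverse]
  have hrev : (List.range nl).reverse = (List.range nl).map (fun i => nl - 1 - i) := by
    conv_lhs => rw [List.range_eq_range']
    rw [List.reverse_range']
    simp
  rw [hrev, List.filter_map, List.map_map]
  rfl

lemma filter_range_shape {α : Type} (h n : Nat) (hn : n ≤ h) (P : Nat → Bool) (f : Nat → α) :
    ((List.range h).filter (fun r => decide (h - n ≤ r) && P r)).map f
      = ((List.range n).filter (fun j => P (h - n + j))).map (fun j => f (h - n + j)) := by
  obtain ⟨a, rfl⟩ : ∃ a, h = a + n := ⟨h - n, by omega⟩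
  have ha : a + n - n = a := by omega
  rw [ha, List.range_add, List.filter_append]
  have h1 : (List.range a).filter (fun r => decide (a ≤ r) && P r) = [] := by
    apply List.filter_eq_nil_iff.mpr
    intro r hr
    simp only [List.mem_range] at hr
    rw [decide_eq_false (by omega), Bool.false_and]
    simp
  rw [h1, List.nil_append, List.filter_map, List.map_map]
  have h2 : ((fun r => decide (a ≤ r) && P r) ∘ fun x => a + x) = fun j => P (a + j) := by
    funext j
    simp [Function.comp]
  rw [h2]
  rfl

-- ---------- A-side round characterisation (del fold = stepA) ----------

-- all positions of a grid in lexicographically descending order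
def posDesc (g : List (List Char)) : List (Nat × Nat) :=
  ((List.range g.length).reverse).flatMap
    (fun y => ((List.range (g.getD y []).length).reverse).map (fun x => (y, x)))

lemma findA_eq_flatMap (g : List (List Char)) :
    findA g = (List.range (g.length - 1)).flatMap (fun y =>
      (List.range (min (g.getD y []).length (g.getD (y+1) []).length - 1)).flatMap (fun x =>
        if (g.getD y []).getD x ' ' = (g.getD y []).getD (x+1) ' '
           ∧ (g.getD y []).getD (x+1) ' ' = (g.getD (y+1) []).getD x ' '
           ∧ (g.getD (y+1) []).getD x ' ' = (g.getD (y+1) []).getD (x+1) ' '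
        then [(y, x), (y, x+1), (y+1, x), (y+1, x+1)]
        else [])) := by
  unfold findA
  have step : ∀ (y : Nat) (data : List (Nat × Nat)),
      (List.range (min (g.getD y []).length (g.getD (y+1) []).length - 1)).foldl (fun data x =>
        if (g.getD y []).getD x ' ' = (g.getD y []).getD (x+1) ' '
           ∧ (g.getD y []).getD (x+1) ' ' = (g.getD (y+1) []).getD x ' '
           ∧ (g.getD (y+1) []).getD x ' ' = (g.getD (y+1) []).getD (x+1) ' '
        then data ++ [(y, x), (y, x+1), (y+1, x), (y+1, x+1)]
        else data) data
      = data ++ (List.range (min (g.getD y []).length (g.getD (y+1) []).length - 1)).flatMap (fun x =>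
        if (g.getD y []).getD x ' ' = (g.getD y []).getD (x+1) ' '
           ∧ (g.getD y []).getD (x+1) ' ' = (g.getD (y+1) []).getD x ' '
           ∧ (g.getD (y+1) []).getD x ' ' = (g.getD (y+1) []).getD (x+1) ' '
        then [(y, x), (y, x+1), (y+1, x), (y+1, x+1)]
        else []) := by
    intro y data
    rw [PySem.List.foldl_congr_mem (g := fun data x =>
      data ++ (if (g.getD y []).getD x ' ' = (g.getD y []).getD (x+1) ' '
           ∧ (g.getD y []).getD (x+1) ' ' = (g.getD (y+1) []).getD x ' '
           ∧ (g.getD (y+1) []).getD x ' ' = (g.getD (y+1) []).getD (x+1) ' '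
        then [(y, x), (y, x+1), (y+1, x), (y+1, x+1)]
        else []))]
    · exact PySem.List.foldl_append_eq_flatMap _ _ _
    · intro acc x _
      split <;> simp
  simp only [step]
  rw [PySem.List.foldl_append_eq_flatMap]
  rfl

lemma mem_findA_valid (g : List (List Char)) (p : Nat × Nat) (hp : p ∈ findA g) :
    p.1 < g.length ∧ p.2 < (g.getD p.1 []).length := by
  rw [findA_eq_flatMap] at hp
  simp only [List.mem_flatMap, List.mem_range] at hp
  obtain ⟨y, hy, x, hx, hmem⟩ := hp
  split at hmem
  · simp only [List.mem_cons, List.not_mem_nil, or_false] at hmem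
    rcases hmem with rfl | rfl | rfl | rfl <;> constructor <;> simp only <;> omega
  · cases hmem

lemma mem_posDesc (g : List (List Char)) (p : Nat × Nat) :
    p ∈ posDesc g ↔ p.1 < g.length ∧ p.2 < (g.getD p.1 []).length := by
  unfold posDesc
  simp only [List.mem_flatMap, List.mem_reverse, List.mem_range, List.mem_map]
  constructor
  · rintro ⟨y, hy, x, hx, rfl⟩; exact ⟨hy, hx⟩
  · rintro ⟨h1, h2⟩; exact ⟨p.1, h1, p.2, h2, rfl⟩

lemma posDesc_pairwise (g : List (List Char)) :
    (posDesc g).Pairwise (fun a b => (toLex b : Lex (Nat × Nat)) < toLex a) := by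
  unfold posDesc
  rw [List.flatMap_def, List.pairwise_flatten]
  constructor
  · intro l' hl'
    simp only [List.mem_map] at hl'
    obtain ⟨y, _, rfl⟩ := hl'
    rw [List.pairwise_map, List.pairwise_reverse]
    refine List.Pairwise.imp ?_ List.pairwise_lt_range
    intro a b hab
    simp only [Prod.Lex.lt_iff, ofLex_toLex]
    exact Or.inr ⟨trivial, hab⟩
  · rw [List.pairwise_map, List.pairwise_reverse]
    refine List.Pairwise.imp ?_ List.pairwise_lt_range
    intro a b hab
    simp only [List.mem_map, List.mem_reverse, List.mem_range]
    rintro x ⟨xa, _, rfl⟩ z ⟨zb, _, rfl⟩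
    simp only [Prod.Lex.lt_iff, ofLex_toLex]
    omega

-- Python's reverse-sort of tuples is the reverse-sort under the lexicographic key
lemma sorted2_eq_sorted_lex (xs : List (Nat × Nat)) (rev : Bool) :
    PySem.List.sorted2 xs Prod.fst Prod.snd rev
      = PySem.List.sorted xs (fun p => (toLex p : Lex (Nat × Nat))) rev := by
  have hpt : ∀ a b : Nat × Nat,
      (decide (a.1 < b.1) || (!decide (b.1 < a.1) && decide (a.2 < b.2)))
        = decide ((toLex a : Lex (Nat × Nat)) < toLex b) := by
    intro a b
    rw [Bool.eq_iff_iff]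
    simp only [Bool.or_eq_true, Bool.and_eq_true, Bool.not_eq_true', decide_eq_true_eq,
      decide_eq_false_iff_not, Prod.Lex.lt_iff, ofLex_toLex]
    omega
  unfold PySem.List.sorted2 PySem.List.sorted
  cases rev <;> simp only [hpt, if_true, if_false, Bool.false_eq_true]

lemma sorted2_rev_canon (xs ys : List (Nat × Nat)) (hperm : ys.Perm xs)
    (hp : ys.Pairwise (fun a b => (toLex b : Lex (Nat × Nat)) < toLex a)) :
    PySem.List.sorted2 xs Prod.fst Prod.snd true = ys := by
  rw [sorted2_eq_sorted_lex]
  exact PySem.List.sorted_rev_eq_of_perm_of_pairwise_gt xs ys _ hperm hp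

-- a fold of per-row modifications is a per-row fold
lemma delFold_rows (ops : List (Nat × Nat)) (g : List (List Char)) :
    ops.foldl (fun b p => b.modify p.1 (fun row => row.eraseIdx p.2)) g
      = (List.range g.length).map (fun y =>
          ((ops.filter (fun p => p.1 == y)).map (fun p => p.2)).foldl
            (fun r x => r.eraseIdx x) (g.getD y [])) := by
  induction ops generalizing g with
  | nil => simp only [List.foldl_nil, List.filter_nil]; exact (map_getD_range g []).symm
  | cons p rest ih =>
    rw [List.foldl_cons, ih]
    rw [List.length_modify]
    apply List.map_congr_left
    intro y hy
    have hylt : y < g.length := by simpa using hy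
    have hget : (g.modify p.1 (fun row => row.eraseIdx p.2)).getD y []
        = if p.1 = y then (g.getD y []).eraseIdx p.2 else g.getD y [] := by
      simp only [List.getD_eq_getElem?_getD, List.getElem?_modify,
        List.getElem?_eq_getElem hylt]
      split <;> rfl
    rw [List.filter_cons, hget]
    by_cases hpy : p.1 = y
    · simp [hpy]
    · simp [hpy]

-- erasing at indices below the left part's length ignores the appended tail
lemma eraseFold_append (xs : List Nat) (r s : List Char)
    (hd : xs.Pairwise (· > ·)) (hb : ∀ x ∈ xs, x < r.length) :
    xs.foldl (fun l i => l.eraseIdx i) (r ++ s)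
      = xs.foldl (fun l i => l.eraseIdx i) r ++ s := by
  induction xs generalizing r with
  | nil => rfl
  | cons x t ih =>
    rcases List.pairwise_cons.mp hd with ⟨hxt, hdt⟩
    have hxr : x < r.length := hb x List.mem_cons_self
    rw [List.foldl_cons, List.foldl_cons, List.eraseIdx_append_of_lt_length hxr]
    apply ih (r.eraseIdx x) hdt
    intro z hz
    have h1 : z < x := hxt z hz
    rw [List.length_eraseIdx]
    split <;> omega

-- erasing at the descending selected indices = keeping the unselected positions
lemma rowDel (r : List Char) (P : Nat → Bool) :
    ((List.range r.length).reverse.filter P).foldl (fun l x => l.eraseIdx x) r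
      = (r.zipIdx.filter (fun q => !P q.2)).map (fun q => q.1) := by
  induction r using List.reverseRecOn with
  | nil => simp
  | append_singleton r' a ih =>
    have hlen : (r' ++ [a]).length = r'.length + 1 := by simp
    rw [hlen, List.range_succ, List.reverse_append]
    simp only [List.reverse_singleton, List.singleton_append, List.filter_cons]
    rw [List.zipIdx_append]
    have htail_pw : ((List.range r'.length).reverse.filter P).Pairwise (· > ·) := by
      apply List.Pairwise.filter
      rw [List.pairwise_reverse]
      exact List.pairwise_lt_range
    have htail_bd : ∀ x ∈ (List.range r'.length).reverse.filter P, x < r'.length := by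
      intro x hx
      have := List.mem_of_mem_filter hx
      simpa using this
    by_cases hP : P r'.length
    · simp only [hP, if_true]
      rw [List.foldl_cons, List.eraseIdx_append_of_length_le (Nat.le_refl _)]
      simp only [Nat.sub_self, List.eraseIdx_cons_zero, List.append_nil]
      rw [ih]
      simp [List.filter_append, hP]
    · simp only [hP, Bool.false_eq_true, if_false]
      rw [eraseFold_append _ _ _ htail_pw htail_bd, ih]
      simp [hP]

-- the single nonempty block of a flatMap over a Nodup list
lemma flatMap_single {α β : Type} [DecidableEq α] (l : List α) (f : α → List β) (y : α)
    (hn : l.Nodup) (hy : y ∈ l) (h0 : ∀ x ∈ l, x ≠ y → f x = []) :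
    l.flatMap f = f y := by
  induction l with
  | nil => cases hy
  | cons x t ih =>
    rcases List.nodup_cons.mp hn with ⟨hxt, hnt⟩
    by_cases hxy : x = y
    · subst hxy
      have hnil : t.flatMap f = [] := by
        rw [List.flatMap_eq_nil_iff]
        intro z hz
        exact h0 z (List.mem_cons_of_mem _ hz) (fun h => hxt (h ▸ hz))
      simp [hnil]
    · have hyt : y ∈ t := by rcases List.mem_cons.mp hy with h | h; exact absurd h.symm hxy; exact h
      rw [List.flatMap_cons, h0 x List.mem_cons_self hxy, List.nil_append]
      exact ih hnt hyt (fun z hz => h0 z (List.mem_cons_of_mem _ hz))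

lemma ys_row (g : List (List Char)) (D : PySem.Set (Nat × Nat)) (y : Nat) (hy : y < g.length) :
    (((posDesc g).filter (fun p => PySem.Set.contains D p)).filter (fun p => p.1 == y)).map (fun p => p.2)
      = (List.range (g.getD y []).length).reverse.filter (fun x => PySem.Set.contains D (y, x)) := by
  rw [List.filter_filter]
  unfold posDesc
  rw [List.filter_flatMap]
  rw [flatMap_single _ _ y (by simp [List.nodup_range]) (by simpa using hy)]
  · rw [List.filter_map, List.map_map]
    have hc : ((fun (a : Nat × Nat) => (a.1 == y) && PySem.Set.contains D a) ∘ (fun x => (y, x)))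
        = fun x => PySem.Set.contains D (y, x) := by
      funext x; simp
    rw [hc]
    have h2 : ((fun (p : Nat × Nat) => p.2) ∘ (fun x => (y, x))) = id := by funext x; rfl
    rw [h2, List.map_id]
  · intro y' _ hne
    rw [List.filter_eq_nil_iff]
    intro p hp
    simp only [List.mem_map] at hp
    obtain ⟨x, _, rfl⟩ := hp
    simp [hne]

-- the complete A round: dedup + reverse-sort + del = per-column filter (stepA)
lemma del_eq_stepA (g : List (List Char)) :
    (PySem.List.sorted2 (PySem.Set.ofList (findA g)) Prod.fst Prod.snd true).foldl
        (fun b p => b.modify p.1 (fun row => row.eraseIdx p.2)) g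
      = stepA g (PySem.Set.ofList (findA g)) := by
  have hnodup_pd : (posDesc g).Nodup := by
    refine List.Pairwise.imp ?_ (posDesc_pairwise g)
    intro a b h heq
    exact absurd (heq ▸ h) (lt_irrefl _)
  have hys_nodup : ((posDesc g).filter (fun p => PySem.Set.contains (PySem.Set.ofList (findA g)) p)).Nodup :=
    List.Nodup.filter _ hnodup_pd
  have hmem : ∀ p, p ∈ (posDesc g).filter (fun p => PySem.Set.contains (PySem.Set.ofList (findA g)) p)
      ↔ p ∈ PySem.Set.ofList (findA g) := by
    intro p
    rw [List.mem_filter, mem_posDesc, PySem.Set.contains_iff]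
    constructor
    · exact fun h => h.2
    · intro h
      refine ⟨?_, h⟩
      exact mem_findA_valid g p (by rwa [PySem.Set.mem_ofList] at h)
  have hperm : ((posDesc g).filter (fun p => PySem.Set.contains (PySem.Set.ofList (findA g)) p)).Perm
      (PySem.Set.ofList (findA g)) :=
    (List.perm_ext_iff_of_nodup hys_nodup (PySem.Set.nodup_ofList _)).mpr hmem
  rw [sorted2_rev_canon _ _ hperm (List.Pairwise.filter _ (posDesc_pairwise g))]
  rw [delFold_rows]
  have hrows : (List.range g.length).map (fun y =>
        (((((posDesc g).filter (fun p => PySem.Set.contains (PySem.Set.ofList (findA g)) p))).filter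
            (fun p => p.1 == y)).map (fun p => p.2)).foldl
          (fun r x => r.eraseIdx x) (g.getD y []))
      = (List.range g.length).map (fun y =>
          (((g.getD y []).zipIdx.filter
            (fun q => !(PySem.Set.contains (PySem.Set.ofList (findA g)) (y, q.2)))).map (fun q => q.1))) := by
    apply List.map_congr_left
    intro y hy
    rw [ys_row g _ y (by simpa using hy)]
    exact rowDel (g.getD y []) (fun x => PySem.Set.contains (PySem.Set.ofList (findA g)) (y, x))
  rw [hrows]
  exact zipIdx_map_getD g [] (fun c col =>
    ((col.zipIdx.filter (fun q => !(PySem.Set.contains (PySem.Set.ofList (findA g)) (c, q.2)))).map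
      (fun q => q.1)))

-- ---------- B-side characterisation ----------

lemma scanB_eq (h w : Nat) (grid : List (List (Option Char))) :
    scanB h w grid = PySem.Set.ofList (findB h w grid) := by
  unfold scanB findB
  have h0 : (PySem.Set.empty : PySem.Set (Nat × Nat)) = PySem.Set.ofList ([] : List (Nat × Nat)) := rfl
  rw [h0]
  apply foldl_ofList_hom
  intro d r
  apply foldl_ofList_hom
  intro d' c
  split
  · rw [PySem.Set.ofList_append]
  · rfl

lemma findB_eq_flatMap (h w : Nat) (grid : List (List (Option Char))) :
    findB h w grid = (List.range (h - 1)).flatMap (fun r =>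
      (List.range (w - 1)).flatMap (fun c =>
        if (grid.getD r []).getD c none ≠ none
           ∧ (grid.getD r []).getD c none = (grid.getD r []).getD (c+1) none
           ∧ (grid.getD r []).getD (c+1) none = (grid.getD (r+1) []).getD c none
           ∧ (grid.getD (r+1) []).getD c none = (grid.getD (r+1) []).getD (c+1) none
        then [(r, c), (r, c+1), (r+1, c), (r+1, c+1)]
        else [])) := by
  unfold findB
  have step : ∀ (r : Nat) (data : List (Nat × Nat)),
      (List.range (w - 1)).foldl (fun (data : List (Nat × Nat)) (c : Nat) =>
        if (grid.getD r []).getD c none ≠ none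
           ∧ (grid.getD r []).getD c none = (grid.getD r []).getD (c+1) none
           ∧ (grid.getD r []).getD (c+1) none = (grid.getD (r+1) []).getD c none
           ∧ (grid.getD (r+1) []).getD c none = (grid.getD (r+1) []).getD (c+1) none
        then data ++ [(r, c), (r, c+1), (r+1, c), (r+1, c+1)]
        else data) data
      = data ++ (List.range (w - 1)).flatMap (fun c =>
        if (grid.getD r []).getD c none ≠ none
           ∧ (grid.getD r []).getD c none = (grid.getD r []).getD (c+1) none
           ∧ (grid.getD r []).getD (c+1) none = (grid.getD (r+1) []).getD c none
           ∧ (grid.getD (r+1) []).getD c none = (grid.getD (r+1) []).getD (c+1) none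
        then [(r, c), (r, c+1), (r+1, c), (r+1, c+1)]
        else []) := by
    intro r data
    rw [PySem.List.foldl_congr_mem (g := fun (data : List (Nat × Nat)) (c : Nat) =>
      data ++ (if (grid.getD r []).getD c none ≠ none
           ∧ (grid.getD r []).getD c none = (grid.getD r []).getD (c+1) none
           ∧ (grid.getD r []).getD (c+1) none = (grid.getD (r+1) []).getD c none
           ∧ (grid.getD (r+1) []).getD c none = (grid.getD (r+1) []).getD (c+1) none
        then [(r, c), (r, c+1), (r+1, c), (r+1, c+1)]
        else []))]
    · exact PySem.List.foldl_append_eq_flatMap _ _ _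
    · intro acc c _
      split <;> simp
  simp only [step]
  rw [PySem.List.foldl_append_eq_flatMap]
  rfl

-- the cell of the converted grid
lemma toB_cell (h : Nat) (g : List (List Char)) (r c : Nat) (hr : r < h) (hc : c < g.length) :
    ((toB h g).getD r []).getD c none = (padCol h (g.getD c [])).getD r none := by
  unfold toB
  rw [getD_range_map _ _ _ hr]
  rw [getD_map_lt _ _ _ hc _ []]

lemma padCol_getD (h : Nat) (col : List Char) (r : Nat) (hlen : col.length ≤ h) (hr : r < h) :
    (padCol h col).getD r none
      = if r < h - col.length then none else some (col.getD (h - 1 - r) ' ') := by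
  unfold padCol
  rcases Nat.lt_or_ge r (h - col.length) with hcase | hcase
  · rw [if_pos hcase, List.getD_append _ _ _ _ (by simpa using hcase)]
    simp [List.getD_eq_getElem?_getD, hcase]
  · rw [if_neg (by omega)]
    rw [List.getD_append_right _ _ _ _ (by simpa using hcase)]
    simp only [List.length_replicate]
    have h1 : r - (h - col.length) < col.reverse.length := by simp; omega
    have h2 : h - 1 - r < col.length := by omega
    have hidx : col.length - 1 - (r - (h - col.length)) = h - 1 - r := by omega
    rw [List.getD_eq_getElem?_getD, List.getElem?_map, List.getElem?_eq_getElem h1]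
    conv_rhs => rw [List.getD_eq_getElem?_getD, List.getElem?_eq_getElem h2]
    simp only [Option.map_some, Option.getD_some, List.getElem_reverse]
    simp only [hidx]

-- membership in findB of the converted grid ↔ membership in findA, via (r,c) ↦ (c, h-1-r)
lemma mem_findB_iff (h w : Nat) (g : List (List Char)) (hInv : InvG h w g) (p : Nat × Nat) :
    p ∈ findB h w (toB h g) ↔ p.1 < h ∧ (p.2, h - 1 - p.1) ∈ findA g := by
  obtain ⟨hw, hcol⟩ := hInv
  have hcolD : ∀ c, c < w → (g.getD c []).length ≤ h := fun c hc =>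
    hcol _ (getD_mem_of_lt g c (by omega) [])
  have cell : ∀ r c, r < h → c < w →
      ((toB h g).getD r []).getD c none
        = if r < h - (g.getD c []).length then none
          else some ((g.getD c []).getD (h - 1 - r) ' ') := by
    intro r c hr hc
    rw [toB_cell h g r c hr (by omega), padCol_getD h _ r (hcolD c hc) hr]
  rw [findB_eq_flatMap, findA_eq_flatMap]
  simp only [List.mem_flatMap, List.mem_range]
  constructor
  · rintro ⟨r, hr, c, hc, hmem⟩
    split at hmem
    case isTrue hcond =>
      obtain ⟨hv, h1, h2, h3⟩ := hcond
      have hr1 : r < h := by omega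
      have hr2 : r + 1 < h := by omega
      have hc1 : c < w := by omega
      have hc2 : c + 1 < w := by omega
      rw [cell r c hr1 hc1] at hv h1
      rw [cell r (c+1) hr1 hc2] at h1 h2
      rw [cell (r+1) c hr2 hc1] at h2 h3
      rw [cell (r+1) (c+1) hr2 hc2] at h3
      by_cases b1 : r < h - (g.getD c []).length
      · rw [if_pos b1] at hv; exact absurd rfl hv
      rw [if_neg b1] at hv h1
      by_cases b2 : r < h - (g.getD (c+1) []).length
      · rw [if_pos b2] at h1; exact absurd h1 (by simp)
      rw [if_neg b2] at h1 h2
      by_cases b3 : r + 1 < h - (g.getD c []).length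
      · rw [if_pos b3] at h2; exact absurd h2 (by simp)
      rw [if_neg b3] at h2 h3
      by_cases b4 : r + 1 < h - (g.getD (c+1) []).length
      · rw [if_pos b4] at h3; exact absurd h3 (by simp)
      rw [if_neg b4] at h3
      have e1 : (g.getD c []).getD (h-1-r) ' ' = (g.getD (c+1) []).getD (h-1-r) ' ' :=
        Option.some.inj h1
      have e2 : (g.getD (c+1) []).getD (h-1-r) ' ' = (g.getD c []).getD (h-1-(r+1)) ' ' :=
        Option.some.inj h2
      have e3 : (g.getD c []).getD (h-1-(r+1)) ' ' = (g.getD (c+1) []).getD (h-1-(r+1)) ' ' :=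
        Option.some.inj h3
      have lc : (g.getD c []).length ≤ h := hcolD c hc1
      have lc2 : (g.getD (c+1) []).length ≤ h := hcolD (c+1) hc2
      have i1 : h - 1 - (r+1) = h - 2 - r := by omega
      have i2 : h - 2 - r + 1 = h - 1 - r := by omega
      rw [i1] at e2 e3
      have hx1 : h - 2 - r + 1 < (g.getD c []).length := by omega
      have hx2 : h - 2 - r + 1 < (g.getD (c+1) []).length := by omega
      have hp1 : p.1 < h := by
        have hmem' := hmem
        simp only [List.mem_cons, List.not_mem_nil, or_false] at hmem'
        rcases hmem' with rfl | rfl | rfl | rfl <;> dsimp only <;> omega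
      refine ⟨hp1, c, by omega, h - 2 - r, by omega, ?_⟩
      have a1 : (g.getD c []).getD (h-2-r) ' ' = (g.getD c []).getD (h-2-r+1) ' ' := by
        rw [i2]; exact e2.symm.trans e1.symm
      have a2 : (g.getD c []).getD (h-2-r+1) ' ' = (g.getD (c+1) []).getD (h-2-r) ' ' := by
        rw [i2]; exact e1.trans (e2.trans e3)
      have a3 : (g.getD (c+1) []).getD (h-2-r) ' ' = (g.getD (c+1) []).getD (h-2-r+1) ' ' := by
        rw [i2]; exact (e2.trans e3).symm
      rw [if_pos ⟨a1, a2, a3⟩]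
      simp only [List.mem_cons, List.not_mem_nil, or_false, Prod.mk.injEq] at hmem ⊢
      rcases hmem with rfl | rfl | rfl | rfl <;> dsimp only <;> omega
    case isFalse => cases hmem
  · rintro ⟨hp1, y, hy, x, hx, hmem⟩
    split at hmem
    case isTrue hcond =>
      obtain ⟨e1, e2, e3⟩ := hcond
      have lc : (g.getD y []).length ≤ h := hcolD y (by omega)
      have lc2 : (g.getD (y+1) []).length ≤ h := hcolD (y+1) (by omega)
      have hx1 : x + 1 < (g.getD y []).length := by omega
      have hx2 : x + 1 < (g.getD (y+1) []).length := by omega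
      have hh2 : 2 ≤ h := by omega
      have hr1 : h - 2 - x < h := by omega
      have hr2 : h - 2 - x + 1 < h := by omega
      have i1 : h - 1 - (h - 2 - x) = x + 1 := by omega
      have i2 : h - 1 - (h - 2 - x + 1) = x := by omega
      refine ⟨h - 2 - x, by omega, y, by omega, ?_⟩
      have hcondB : ((toB h g).getD (h-2-x) []).getD y none ≠ none
          ∧ ((toB h g).getD (h-2-x) []).getD y none = ((toB h g).getD (h-2-x) []).getD (y+1) none
          ∧ ((toB h g).getD (h-2-x) []).getD (y+1) none = ((toB h g).getD (h-2-x+1) []).getD y none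
          ∧ ((toB h g).getD (h-2-x+1) []).getD y none = ((toB h g).getD (h-2-x+1) []).getD (y+1) none := by
        rw [cell (h-2-x) y hr1 (by omega), cell (h-2-x) (y+1) hr1 (by omega),
            cell (h-2-x+1) y hr2 (by omega), cell (h-2-x+1) (y+1) hr2 (by omega),
            if_neg (by omega), if_neg (by omega), if_neg (by omega), if_neg (by omega), i1, i2]
        exact ⟨by simp, congrArg some (e2.trans e3),
          congrArg some (e3.symm.trans (e2.symm.trans e1.symm)), congrArg some (e1.trans e2)⟩
      rw [if_pos hcondB]
      simp only [List.mem_cons, List.not_mem_nil, or_false, Prod.mk.injEq] at hmem ⊢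
      have hxh : x + 1 ≤ h - 1 := by omega
      rcases hmem with ⟨q1, q2⟩ | ⟨q1, q2⟩ | ⟨q1, q2⟩ | ⟨q1, q2⟩
      · have hp : p.1 = h - 2 - x + 1 := by omega
        exact Or.inr (Or.inr (Or.inl (Prod.ext hp q1)))
      · have hp : p.1 = h - 2 - x := by omega
        exact Or.inl (Prod.ext hp q1)
      · have hp : p.1 = h - 2 - x + 1 := by omega
        exact Or.inr (Or.inr (Or.inr (Prod.ext hp q1)))
      · have hp : p.1 = h - 2 - x := by omega
        exact Or.inr (Or.inl (Prod.ext hp q1))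
    case isFalse => cases hmem

lemma mem_SB_iff (h w : Nat) (g : List (List Char)) (hInv : InvG h w g) (p : Nat × Nat) :
    p ∈ PySem.Set.ofList (findB h w (toB h g))
      ↔ p.1 < h ∧ (p.2, h - 1 - p.1) ∈ PySem.Set.ofList (findA g) := by
  rw [PySem.Set.mem_ofList, PySem.Set.mem_ofList]
  exact mem_findB_iff h w g hInv p

lemma SB_perm (h w : Nat) (g : List (List Char)) (hInv : InvG h w g) :
    ((PySem.Set.ofList (findB h w (toB h g))).map (fun p => (p.2, h - 1 - p.1))).Perm
      (PySem.Set.ofList (findA g)) := by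
  have hvalid : ∀ p ∈ PySem.Set.ofList (findB h w (toB h g)), p.1 < h := by
    intro p hp
    exact ((mem_SB_iff h w g hInv p).mp hp).1
  have hnodup : ((PySem.Set.ofList (findB h w (toB h g))).map (fun p => (p.2, h - 1 - p.1))).Nodup := by
    refine List.Nodup.map_on ?_ (PySem.Set.nodup_ofList _)
    intro p hp q hq heq
    obtain ⟨e1, e2⟩ := Prod.mk.inj heq
    have h1 := hvalid p hp
    have h2 := hvalid q hq
    have : p.1 = q.1 := by omega
    exact Prod.ext this e1
  refine (List.perm_ext_iff_of_nodup hnodup (PySem.Set.nodup_ofList _)).mpr ?_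
  intro q
  simp only [List.mem_map]
  constructor
  · rintro ⟨p, hp, rfl⟩
    exact ((mem_SB_iff h w g hInv p).mp hp).2
  · intro hq
    have hv := mem_findA_valid g q (by rwa [PySem.Set.mem_ofList] at hq)
    have hlen : (g.getD q.1 []).length ≤ h := hInv.2 _ (getD_mem_of_lt g q.1 hv.1 [])
    have hq2 : q.2 < h := by omega
    refine ⟨(h - 1 - q.2, q.1), ?_, ?_⟩
    · rw [mem_SB_iff h w g hInv]
      refine ⟨by dsimp only; omega, ?_⟩
      dsimp only
      have e : h - 1 - (h - 1 - q.2) = q.2 := by omega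
      rw [e]
      exact hq
    · dsimp only
      have e : h - 1 - (h - 1 - q.2) = q.2 := by omega
      rw [e]

lemma SB_length (h w : Nat) (g : List (List Char)) (hInv : InvG h w g) :
    (PySem.Set.ofList (findB h w (toB h g))).length = (PySem.Set.ofList (findA g)).length := by
  have := (SB_perm h w g hInv).length_eq
  simpa using this

-- B's gravity on the converted grid is the conversion of A's filtered step
lemma fall_eq (h w : Nat) (g : List (List Char)) (hInv : InvG h w g) :
    fallB h w (toB h g) (PySem.Set.ofList (findB h w (toB h g)))
      = toB h (stepA g (PySem.Set.ofList (findA g))) := by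
  obtain ⟨hw, hcol⟩ := hInv
  set SA := PySem.Set.ofList (findA g) with hSA
  set SB := PySem.Set.ofList (findB h w (toB h g)) with hSB
  have hstepA_len : (stepA g SA).length = w := by simp [stepA, hw]
  have hstepA_col : ∀ c, c < w →
      (stepA g SA).getD c []
        = (((g.getD c []).zipIdx.filter (fun q => !(PySem.Set.contains SA (c, q.2)))).map
            (fun q => q.1)) := by
    intro c hc
    unfold stepA
    have hcz : c < g.zipIdx.length := by simpa [hw] using hc
    rw [getD_map_lt _ _ _ hcz _ ([], 0)]
    have : g.zipIdx.getD c ([], 0) = (g.getD c [], c) := by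
      simp only [List.getD_eq_getElem?_getD]
      rw [List.getElem?_eq_getElem hcz]
      simp [List.getElem_zipIdx,
        List.getElem?_eq_getElem (show c < g.length by omega)]
    rw [this]
  have hstack : ∀ c, c < w →
      (((List.range h).filter (fun r =>
          (((toB h g).getD r []).getD c none).isSome && !(PySem.Set.contains SB (r, c)))).map
        (fun r => ((toB h g).getD r []).getD c none))
      = ((stepA g SA).getD c []).reverse.map some := by
    intro c hc
    have hlen : (g.getD c []).length ≤ h := hcol _ (getD_mem_of_lt g c (by omega) [])
    have hcell : ∀ r, r < h → ((toB h g).getD r []).getD c none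
        = if r < h - (g.getD c []).length then none
          else some ((g.getD c []).getD (h - 1 - r) ' ') := by
      intro r hr
      rw [toB_cell h g r c hr (by omega), padCol_getD h _ r hlen hr]
    have hcontains : ∀ r, r < h →
        (PySem.Set.contains SB (r, c)) = (PySem.Set.contains SA (c, h - 1 - r)) := by
      intro r hr
      have hmm : (r, c) ∈ SB ↔ (c, h - 1 - r) ∈ SA := by
        rw [hSB, hSA, mem_SB_iff h w g ⟨hw, hcol⟩]
        exact ⟨fun hx => hx.2, fun hx => ⟨hr, hx⟩⟩
      rw [Bool.eq_iff_iff, PySem.Set.contains_iff, PySem.Set.contains_iff]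
      exact hmm
    have hfc : ((List.range h).filter (fun r =>
          (((toB h g).getD r []).getD c none).isSome && !(PySem.Set.contains SB (r, c))))
        = ((List.range h).filter (fun r =>
            decide (h - (g.getD c []).length ≤ r) && !(PySem.Set.contains SA (c, h - 1 - r)))) := by
      apply List.filter_congr
      intro r hr
      have hrh : r < h := by simpa using hr
      rw [hcell r hrh, hcontains r hrh]
      by_cases hcase : r < h - (g.getD c []).length
      · rw [if_pos hcase, decide_eq_false (by omega)]
        simp
      · rw [if_neg hcase, decide_eq_true (by omega)]
        simp
    rw [hfc]
    have hm2 : ((List.range h).filter (fun r =>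
          decide (h - (g.getD c []).length ≤ r) && !(PySem.Set.contains SA (c, h - 1 - r)))).map
        (fun r => ((toB h g).getD r []).getD c none)
      = ((List.range h).filter (fun r =>
          decide (h - (g.getD c []).length ≤ r) && !(PySem.Set.contains SA (c, h - 1 - r)))).map
        (fun r => some ((g.getD c []).getD (h - 1 - r) ' ')) := by
      apply List.map_congr_left
      intro r hr
      rcases List.mem_filter.mp hr with ⟨hr1, hr2⟩
      have hrh : r < h := by simpa using hr1
      have hge : h - (g.getD c []).length ≤ r := by
        simp only [Bool.and_eq_true, decide_eq_true_eq] at hr2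
        exact hr2.1
      rw [hcell r hrh, if_neg (by omega)]
    rw [hm2, filter_range_shape h (g.getD c []).length hlen
      (fun r => !(PySem.Set.contains SA (c, h - 1 - r)))
      (fun r => some ((g.getD c []).getD (h - 1 - r) ' '))]
    have hnew : (stepA g SA).getD c []
        = ((List.range (g.getD c []).length).filter (fun i => !(PySem.Set.contains SA (c, i)))).map
            (fun i => (g.getD c []).getD i ' ') := by
      rw [hstepA_col c hc]
      have hzip : (g.getD c []).zipIdx
          = (List.range (g.getD c []).length).map (fun i => ((g.getD c []).getD i ' ', i)) := by
        simpa using (zipIdx_map_getD (g.getD c []) ' ' (fun i v => (v, i))).symm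
      rw [hzip, List.filter_map, List.map_map]
      rfl
    rw [hnew, List.map_reverse, List.map_map, rev_filter_map_range]
    have hpred : ∀ j : Nat, h - 1 - (h - (g.getD c []).length + j)
        = (g.getD c []).length - 1 - j := by
      intro j; omega
    simp only [hpred]
    rfl
  unfold fallB
  conv_rhs => rw [toB]
  apply List.map_congr_left
  intro r hr
  rw [map_eq_range_map (stepA g SA) (fun col => (padCol h col).getD r none) [], hstepA_len]
  apply List.map_congr_left
  intro c hc
  have hcw : c < w := by simpa using hc
  have hpad : (paddedB h w (toB h g) SB).getD c [] = padCol h ((stepA g SA).getD c []) := by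
    unfold paddedB stacksB
    rw [List.map_map, getD_range_map _ _ _ hcw]
    simp only [Function.comp_apply]
    rw [hstack c hcw]
    unfold padCol
    have hl : (((stepA g SA).getD c []).reverse.map some).length
        = ((stepA g SA).getD c []).length := by simp
    rw [hl]
  rw [hpad]

-- the main loop correspondence
lemma loops_eq : ∀ (fuel : Nat) (g : List (List Char)) (cnt : Int) (h w : Nat),
    InvG h w g → loopA fuel g cnt = loopB fuel h w (toB h g) cnt := by
  intro fuel
  induction fuel with
  | zero => intro g cnt h w _; rfl
  | succ f ih =>
    intro g cnt h w hInv
    have hperm := PySem.List.sorted2_perm (PySem.Set.ofList (findA g)) Prod.fst Prod.snd true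
    have hlen := SB_length h w g hInv
    show (if PySem.List.sorted2 (PySem.Set.ofList (findA g)) Prod.fst Prod.snd true ≠ [] then
        loopA f ((PySem.List.sorted2 (PySem.Set.ofList (findA g)) Prod.fst Prod.snd true).foldl
          (fun b p => b.modify p.1 (fun row => row.eraseIdx p.2)) g)
          (cnt + ((PySem.List.sorted2 (PySem.Set.ofList (findA g)) Prod.fst Prod.snd true).length : Int))
      else cnt + ((PySem.List.sorted2 (PySem.Set.ofList (findA g)) Prod.fst Prod.snd true).length : Int))
      = (if scanB h w (toB h g) = [] then cnt
        else loopB f h w (fallB h w (toB h g) (scanB h w (toB h g)))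
          (cnt + ((scanB h w (toB h g)).length : Int)))
    rw [scanB_eq]
    by_cases hnil : PySem.Set.ofList (findA g) = []
    · have hdat : PySem.List.sorted2 (PySem.Set.ofList (findA g)) Prod.fst Prod.snd true = [] :=
        List.perm_nil.mp (hperm.trans (List.perm_nil.mpr hnil))
      have hB : PySem.Set.ofList (findB h w (toB h g)) = [] := by
        rw [← List.length_eq_zero_iff, hlen, hnil]
        rfl
      rw [if_neg (by simp [hdat]), if_pos hB, hdat]
      simp
    · have hdat : PySem.List.sorted2 (PySem.Set.ofList (findA g)) Prod.fst Prod.snd true ≠ [] := by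
        intro hx
        exact hnil (List.perm_nil.mp ((hx ▸ hperm : ([] : List (Nat × Nat)).Perm _).symm))
      have hB : PySem.Set.ofList (findB h w (toB h g)) ≠ [] := by
        intro hx
        rw [← List.length_eq_zero_iff] at hx
        rw [hlen] at hx
        exact hnil (List.length_eq_zero_iff.mp hx)
      rw [if_pos hdat, if_neg hB, del_eq_stepA, hperm.length_eq, ← hlen, fall_eq h w g hInv]
      apply ih
      constructor
      · simp [stepA, hInv.1]
      · intro col hcolmem
        simp only [stepA, List.mem_map] at hcolmem
        obtain ⟨p, hp, rfl⟩ := hcolmem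
        calc ((p.1.zipIdx.filter (fun q => !(PySem.Set.contains (PySem.Set.ofList (findA g)) (p.2, q.2)))).map
              (fun q => q.1)).length
            ≤ p.1.zipIdx.length := by
              rw [List.length_map]; exact List.length_filter_le _ _
          _ = p.1.length := by rw [List.length_zipIdx]
          _ ≤ h := hInv.2 p.1 (List.fst_mem_of_mem_zipIdx hp)

-- ---------- the initial grids ----------

lemma pyZip_len (board : List String) :
    (pyZipStar ((board.map (fun x => x.toList)).reverse)).length
      = (board.map (fun row => row.toList.length)).min?.getD 0 := by
  unfold pyZipStar
  rw [List.length_map, List.length_range, List.map_reverse, min?_reverse, List.map_map]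
  rfl

lemma pyZip_cols (board : List String) :
    ∀ col ∈ pyZipStar ((board.map (fun x => x.toList)).reverse), col.length ≤ board.length := by
  intro col hcol
  unfold pyZipStar at hcol
  simp only [List.mem_map] at hcol
  obtain ⟨i, _, rfl⟩ := hcol
  simp

lemma pyZip_col_len (board : List String) (c : Nat)
    (hc : c < (pyZipStar ((board.map (fun x => x.toList)).reverse)).length) :
    ((pyZipStar ((board.map (fun x => x.toList)).reverse)).getD c []).length = board.length := by
  unfold pyZipStar at hc ⊢
  rw [getD_range_map _ _ _ (by simpa using hc)]
  simp

lemma init_corr (board : List String) :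
    (List.range board.length).map (fun r =>
      (List.range ((board.map (fun row => row.toList.length)).min?.getD 0)).map
        (fun c => some ((board.getD r "").toList.getD c ' ')))
      = toB board.length (pyZipStar ((board.map (fun x => x.toList)).reverse)) := by
  unfold toB
  apply List.map_congr_left
  intro r hr
  have hrh : r < board.length := by simpa using hr
  rw [map_eq_range_map (pyZipStar ((board.map (fun x => x.toList)).reverse))
    (fun col => (padCol board.length col).getD r none) [], pyZip_len]
  apply List.map_congr_left
  intro c hc
  have hcw : c < (board.map (fun row => row.toList.length)).min?.getD 0 := by simpa using hc
  have hcz : c < (pyZipStar ((board.map (fun x => x.toList)).reverse)).length := by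
    rw [pyZip_len]; exact hcw
  have hl := pyZip_col_len board c hcz
  rw [padCol_getD _ _ _ (le_of_eq hl) hrh, hl]
  rw [if_neg (show ¬ (r < board.length - board.length) by omega)]
  congr 1
  unfold pyZipStar
  rw [getD_range_map _ _ _ (by
    rw [List.map_reverse, min?_reverse, List.map_map]; exact hcw)]
  have hb0 : board.length - 1 - r < ((board.map (fun x => x.toList)).reverse).length := by
    simp only [List.length_reverse, List.length_map]
    omega
  rw [getD_map_lt _ _ _ hb0 _ []]
  have hrev : ((board.map (fun x => x.toList)).reverse).getD (board.length - 1 - r) []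
      = (board.map (fun x => x.toList)).getD r [] := by
    have hb2 : r < (board.map (fun x => x.toList)).length := by
      simp only [List.length_map]
      exact hrh
    have hidx2 : (board.map (fun x => x.toList)).length - 1 - (board.length - 1 - r) = r := by
      simp only [List.length_map]
      omega
    simp only [List.getD_eq_getElem?_getD]
    rw [List.getElem?_eq_getElem hb0, List.getElem?_eq_getElem hb2]
    simp only [Option.getD_some, List.getElem_reverse]
    simp only [hidx2]
  rw [hrev, getD_map_lt _ _ _ (show r < board.length from hrh) _ ""]

lemma cellCount_init (board : List String) :
    cellCount (pyZipStar ((board.map (fun x => x.toList)).reverse))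
      = board.length * ((board.map (fun row => row.toList.length)).min?.getD 0) := by
  unfold cellCount pyZipStar
  rw [List.map_map]
  have hall : ((List.range (((board.map (fun x => x.toList)).reverse.map List.length).min?.getD 0)).map
      (List.length ∘ fun i => ((board.map (fun x => x.toList)).reverse).map (fun r => r.getD i ' ')))
      = List.replicate (((board.map (fun x => x.toList)).reverse.map List.length).min?.getD 0)
          board.length := by
    rw [List.eq_replicate_iff]
    constructor
    · simp
    · intro b hb
      simp only [List.mem_map, Function.comp] at hb
      obtain ⟨i, _, rfl⟩ := hb
      simp
  rw [hall, List.sum_replicate, smul_eq_mul, List.map_reverse, min?_reverse, List.map_map,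
    Nat.mul_comm]
  rfl

-- ===== VERDICT (by name: the statement is the Claim_ definition above) =====
theorem solution_spec : Claim_equal_solution := by
  intro m n board _
  show solution m n board = solution_alt m n board
  show loopA (cellCount (pyZipStar ((board.map (fun x => x.toList)).reverse)) + 1)
      (pyZipStar ((board.map (fun x => x.toList)).reverse)) 0
    = loopB (board.length * ((board.map (fun row => row.toList.length)).min?.getD 0) + 1)
        board.length ((board.map (fun row => row.toList.length)).min?.getD 0)
        ((List.range board.length).map (fun r =>
          (List.range ((board.map (fun row => row.toList.length)).min?.getD 0)).map
            (fun c => some ((board.getD r "").toList.getD c ' ')))) 0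
  rw [init_corr board, cellCount_init board]
  exact loops_eq _ _ _ _ _ ⟨pyZip_len board, pyZip_cols board⟩
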